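-- pv_equiv track=rewrite | github.com/saurabhndis/identity-fuzzer | lib/ad-simulator/src/ad_simulator/directory/dn.py | normalize_dn
-- ===== SOURCE A (Python) =====
-- def parse_dn(dn_string: str) -> list[tuple[str, str, str]]:
--     """Parse a DN string into a list of (attribute, value, separator) tuples.
--
--     Args:
--         dn_string: A distinguished name string, e.g. ``"CN=John Doe,CN=Users,DC=testlab,DC=local"``.
--
--     Returns:
--         A list of ``(attr, value, separator)`` tuples. The separator is ``","``
--         between components and ``""`` for the last component.
--         Returns an empty list for empty/whitespace-only input.
--
--     Examples:
--         >>> parse_dn("CN=John Doe,CN=Users,DC=testlab,DC=local")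
--         [('CN', 'John Doe', ','), ('CN', 'Users', ','), ('DC', 'testlab', ','), ('DC', 'local', '')]
--         >>> parse_dn("")
--         []
--     """
--     dn_string = dn_string.strip()
--     if not dn_string:
--         return []
--
--     result: list[tuple[str, str, str]] = []
--
--     # Split on commas that are not escaped
--     # AD DNs use backslash-escaping for special chars: \, \+ \; etc.
--     components = _split_dn(dn_string)
--
--     for i, component in enumerate(components):
--         component = component.strip()
--         if not component:
--             continue
--
--         eq_pos = component.find("=")
--         if eq_pos < 0:
--             # Malformed component — treat entire thing as CN value
--             attr = "CN"
--             value = component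
--         else:
--             attr = component[:eq_pos].strip()
--             value = component[eq_pos + 1:].strip()
--
--         separator = "," if i < len(components) - 1 else ""
--         result.append((attr, value, separator))
--
--     return result
--
-- def _split_dn(dn_string: str) -> list[str]:
--     """Split a DN string on unescaped commas.
--
--     Handles backslash-escaped commas (``\\,``) within attribute values.
--     """
--     components: list[str] = []
--     current: list[str] = []
--     i = 0
--     while i < len(dn_string):
--         ch = dn_string[i]
--         if ch == "\\" and i + 1 < len(dn_string):
--             # Escaped character — consume both
--             current.append(ch)
--             current.append(dn_string[i + 1])
--             i += 2
--         elif ch == ",":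
--             components.append("".join(current))
--             current = []
--             i += 1
--         else:
--             current.append(ch)
--             i += 1
--
--     if current:
--         components.append("".join(current))
--
--     return components
--
-- def normalize_dn(dn_string: str) -> str:
--     """Normalize a DN to a canonical lowercase form for comparison.
--
--     Lowercases attribute names and values, trims whitespace around ``=`` and ``,``.
--
--     Args:
--         dn_string: The DN string to normalize.
--
--     Returns:
--         A normalized, lowercase DN string.
--
--     Examples:
--         >>> normalize_dn("CN=John Doe,CN=Users,DC=TestLab,DC=Local")
--         'cn=john doe,cn=users,dc=testlab,dc=local'
--         >>> normalize_dn("")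
--         ''
--     """
--     parts = parse_dn(dn_string)
--     if not parts:
--         return ""
--
--     components: list[str] = []
--     for attr, value, _ in parts:
--         components.append(f"{attr.lower()}={value.lower()}")
--
--     return ",".join(components)
-- ===== SOURCE B (Python) =====
-- def normalize_dn(dn_string: str) -> str:
--     """Index-based normalization: first compute all split positions (unescaped
--     commas, recognized by the parity of the backslash run preceding them),
--     then slice the string at those positions and normalize each slice."""
--     s = dn_string.strip()
--     cuts = []
--     run = 0
--     for i, ch in enumerate(s):
--         if ch == ',' and run % 2 == 0:
--             cuts.append(i)
--         run = run + 1 if ch == '\\' else 0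
--     bounds = [-1] + cuts + [len(s)]
--     out = []
--     for a, b in zip(bounds, bounds[1:]):
--         comp = s[a + 1:b].strip()
--         if not comp:
--             continue
--         eq = comp.find('=')
--         if eq < 0:
--             out.append('cn=' + comp.lower())
--         else:
--             out.append(comp[:eq].strip().lower() + '=' + comp[eq + 1:].strip().lower())
--     return ','.join(out)
-- ===== Notes on version B (the rewrite author's own statement) =====
-- stated objective: alternative
-- what changed: Replaced A's streaming escape-consuming automaton (buffer that eats backslash pairs, component list, (attr,value,separator) tuples, then a join) with an index-based two-phase algorithm: one counter pass marks a comma as a split point iff the backslash run immediately before it has even length, then the string is sliced at those positions and each slice normalized directly; correctness rests on the fact that a comma is unescaped exactly when preceded by an even backslash run.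
import Mathlib
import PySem

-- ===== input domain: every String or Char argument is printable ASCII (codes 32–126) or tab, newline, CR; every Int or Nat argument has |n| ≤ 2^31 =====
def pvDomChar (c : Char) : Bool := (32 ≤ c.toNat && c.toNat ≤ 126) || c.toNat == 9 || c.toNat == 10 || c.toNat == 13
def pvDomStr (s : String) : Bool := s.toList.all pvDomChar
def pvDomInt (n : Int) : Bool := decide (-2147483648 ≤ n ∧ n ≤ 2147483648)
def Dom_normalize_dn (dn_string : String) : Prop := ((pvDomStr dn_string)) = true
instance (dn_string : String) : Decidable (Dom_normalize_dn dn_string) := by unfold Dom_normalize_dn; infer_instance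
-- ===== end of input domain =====

-- B replaces A's escape-consuming buffer automaton + tuple stage with a two-phase index
-- algorithm (mark unescaped commas by backslash-run parity, then slice and normalize);
-- objective: alternative algorithm, same cost.


-- ===== PORT A =====

-- _split_dn's while loop: `current` is the buffer, components are emitted in order.
def pvSplitGo : List Char → List Char → List (List Char)
  | cur, '\\' :: c :: rest => pvSplitGo (cur ++ ['\\', c]) rest
  | cur, ',' :: rest => cur :: pvSplitGo [] rest
  | cur, c :: rest => pvSplitGo (cur ++ [c]) rest
  | cur, [] => if cur = [] then [] else [cur]

def pvSplitDn (s : List Char) : List (List Char) := pvSplitGo [] s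

-- parse_dn's for loop over enumerate(components); n = len(components).
def pvParseLoop (n : Int) : List (Int × List Char) → List (List Char × List Char × List Char)
  | [] => []
  | (i, component) :: rest =>
    let component := PySem.Chars.strip component
    if component = [] then pvParseLoop n rest
    else
      let eqPos := PySem.Chars.find component ['=']
      let av : List Char × List Char :=
        if eqPos < 0 then (['C', 'N'], component)
        else (PySem.Chars.strip (PySem.Chars.slice component none (some eqPos)),
              PySem.Chars.strip (PySem.Chars.slice component (some (eqPos + 1)) none))
      let separator := if i < n - 1 then [','] else ([] : List Char)
      (av.1, av.2, separator) :: pvParseLoop n rest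

def pvParseDn (dn_string : List Char) : List (List Char × List Char × List Char) :=
  let s := PySem.Chars.strip dn_string
  if s = [] then []
  else
    let components := pvSplitDn s
    pvParseLoop (components.length : Int) (PySem.List.enumerate components)

def normalize_dn (dn_string : String) : String :=
  let parts := pvParseDn dn_string.toList
  if parts = [] then ""
  else
    String.ofList (PySem.Chars.join [','] (parts.map
      (fun t => PySem.Chars.lower t.1 ++ ['='] ++ PySem.Chars.lower t.2.1)))

-- ===== PORT B =====

-- B's cut-marking pass: i is the enumerate index, run counts the current backslash run;
-- a comma is a split point iff run % 2 == 0.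
def pvCutsB : Int → Int → List Char → List Int
  | _, _, [] => []
  | i, run, c :: rest =>
    let cuts := pvCutsB (i + 1) (if c = '\\' then run + 1 else 0) rest
    if c = ',' ∧ PySem.Int.mod run 2 = 0 then i :: cuts else cuts

-- B's per-slice normalization (the loop body after `comp = s[a+1:b].strip()`): skip
-- empty, otherwise produce the lowered `attr=value` string.
def pvNormComp (piece : List Char) : Option (List Char) :=
  let comp := PySem.Chars.strip piece
  if comp = [] then none
  else
    let eq := PySem.Chars.find comp ['=']
    if eq < 0 then some (['c', 'n', '='] ++ PySem.Chars.lower comp)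
    else some (PySem.Chars.lower (PySem.Chars.strip (PySem.Chars.slice comp none (some eq)))
                 ++ ['='] ++
               PySem.Chars.lower (PySem.Chars.strip (PySem.Chars.slice comp (some (eq + 1)) none)))

def normalize_dn_alt (dn_string : String) : String :=
  let s := PySem.Chars.strip dn_string.toList
  let cuts := pvCutsB 0 0 s
  let bounds := (-1 : Int) :: (cuts ++ [(s.length : Int)])
  let out := (bounds.zip bounds.tail).filterMap
    (fun ab => pvNormComp (PySem.Chars.slice s (some (ab.1 + 1)) (some ab.2)))
  String.ofList (PySem.Chars.join [','] out)

-- ===== PRECONDITION & SPEC =====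
def Spec_normalize_dn (dn_string : String) (out : String) : Prop := out = normalize_dn_alt dn_string
instance (dn_string : String) (out : String) : Decidable (Spec_normalize_dn dn_string out) := by unfold Spec_normalize_dn; infer_instance

-- ===== CLAIM (what is proved, stated in full; the proofs are below) =====
def Claim_equal_normalize_dn : Prop := ∀ (dn_string : String), Dom_normalize_dn dn_string → Spec_normalize_dn dn_string (normalize_dn dn_string)

-- ===== LEMMAS AND PROOFS =====

-- Proof-side reference split: one-Bool state machine (par = parity of the current
-- backslash run), cons-based, keeping the trailing empty component.
def splitPar : Bool → List Char → List (List Char)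
  | _, [] => [[]]
  | par, c :: rest =>
    if c = ',' ∧ par = false then [] :: splitPar false rest
    else (splitPar (if c = '\\' then !par else false) rest).modifyHead (c :: ·)

def dropTrailNil : List (List Char) → List (List Char)
  | [] => []
  | [x] => if x = [] then [] else [x]
  | x :: l => x :: dropTrailNil l

-- Slice decomposition of B's zip-of-bounds: chunk from p+1 to the next cut, recursively.
def sliceChunks (s : List Char) (p : Int) : List Int → List (List Char)
  | [] => [PySem.Chars.slice s (some (p + 1)) (some (s.length : Int))]
  | c :: cs => PySem.Chars.slice s (some (p + 1)) (some c) :: sliceChunks s c cs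

theorem pvNormComp_nil : pvNormComp [] = none := rfl

theorem splitPar_ne_nil (par : Bool) (t : List Char) : splitPar par t ≠ [] := by
  induction t generalizing par with
  | nil => simp [splitPar]
  | cons c rest ih =>
    simp only [splitPar]
    split
    · simp
    · cases h : splitPar (if c = '\\' then !par else false) rest with
      | nil => exact absurd h (ih _)
      | cons a l => simp [List.modifyHead]

theorem splitPar_comma (rest : List Char) :
    splitPar false (',' :: rest) = [] :: splitPar false rest := by
  simp [splitPar]

theorem splitPar_cons_other (par : Bool) (c : Char) (rest : List Char)
    (h : ¬ (c = ',' ∧ par = false)) :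
    splitPar par (c :: rest) = (splitPar (if c = '\\' then !par else false) rest).modifyHead (c :: ·) := by
  simp only [splitPar]
  rw [if_neg h]

theorem splitPar_bs (c : Char) (rest : List Char) :
    splitPar false ('\\' :: c :: rest)
      = ((splitPar false rest).modifyHead (c :: ·)).modifyHead ('\\' :: ·) := by
  by_cases hb : c = '\\' <;> simp [splitPar, hb]

theorem filterMap_dropTrailNil (l : List (List Char)) :
    (dropTrailNil l).filterMap pvNormComp = l.filterMap pvNormComp := by
  induction l with
  | nil => rfl
  | cons x tl ih =>
    cases tl with
    | nil =>
      by_cases h : x = [] <;> simp [dropTrailNil, h, pvNormComp_nil]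
    | cons y tl' =>
      simp only [dropTrailNil, List.filterMap_cons] at ih ⊢
      cases pvNormComp x <;> simp_all

-- A's split equals the parity machine (cur prefixed onto the head, trailing [] dropped).
theorem pvSplitGo_eq (cur t : List Char) :
    pvSplitGo cur t = dropTrailNil ((splitPar false t).modifyHead (cur ++ ·)) := by
  induction cur, t using pvSplitGo.induct with
  | case1 cur c rest ih =>
    rw [splitPar_bs]
    rw [show pvSplitGo cur ('\\' :: c :: rest) = pvSplitGo (cur ++ ['\\', c]) rest from rfl, ih]
    cases h : splitPar false rest <;> simp [List.modifyHead]
  | case2 cur rest ih =>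
    rw [show pvSplitGo cur (',' :: rest) = cur :: pvSplitGo [] rest from rfl, ih, splitPar_comma]
    cases hsp : splitPar false rest with
    | nil => exact absurd hsp (splitPar_ne_nil _ _)
    | cons y l => simp [dropTrailNil, List.modifyHead]
  | case3 cur c rest h1 h2 ih =>
    have hc2 : c ≠ ',' := fun h => h2 h
    have h4 : splitPar false (c :: rest) = (splitPar false rest).modifyHead (c :: ·) := by
      by_cases hb : c = '\\'
      · cases rest with
        | nil => subst hb; simp [splitPar]
        | cons d r' => exact (h1 d r' hb rfl).elim
      · rw [splitPar_cons_other false c rest (by simp [hc2]), if_neg hb]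
    have h5 : pvSplitGo cur (c :: rest) = pvSplitGo (cur ++ [c]) rest := by
      rw [pvSplitGo.eq_def]
      split <;> simp_all
    rw [h5, ih, h4]
    cases h : splitPar false rest <;> simp [List.modifyHead]
  | case4 => rfl
  | case5 cur hc =>
    simp [pvSplitGo, splitPar, List.modifyHead, dropTrailNil, hc]

-- A's per-component output (lowered attr=value, separator dropped) is exactly pvNormComp.
theorem pvParseLoop_map (n : Int) (l : List (Int × List Char)) :
    (pvParseLoop n l).map (fun t => PySem.Chars.lower t.1 ++ ['='] ++ PySem.Chars.lower t.2.1)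
      = (l.map Prod.snd).filterMap pvNormComp := by
  induction l with
  | nil => rfl
  | cons hd tl ih =>
    obtain ⟨i, component⟩ := hd
    rw [List.map_cons, List.filterMap_cons]
    simp only [List.filterMap_map, Function.comp_def, List.append_assoc, List.singleton_append] at ih
    simp only [pvParseLoop]
    by_cases h : PySem.Chars.strip component = []
    · have hf : pvNormComp component = none := by simp [pvNormComp, h]
      simp [h, hf, ih]
    · by_cases he : PySem.Chars.find (PySem.Chars.strip component) ['='] < 0
      · have hf : pvNormComp component = some (['c', 'n', '='] ++ PySem.Chars.lower (PySem.Chars.strip component)) := by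
          simp [pvNormComp, h, he]
        have hcn : PySem.Chars.lower ['C', 'N'] = ['c', 'n'] := by decide
        simp [h, he, hf, ih, hcn]
      · have hf : pvNormComp component = some
            (PySem.Chars.lower (PySem.Chars.strip (PySem.Chars.slice (PySem.Chars.strip component) none
                (some (PySem.Chars.find (PySem.Chars.strip component) ['='])))) ++ ['='] ++
             PySem.Chars.lower (PySem.Chars.strip (PySem.Chars.slice (PySem.Chars.strip component)
                (some (PySem.Chars.find (PySem.Chars.strip component) ['='] + 1)) none))) := by
          simp [pvNormComp, h, he]
        simp [h, he, hf, ih]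

-- every cut index produced from start i is ≥ i
theorem pvCutsB_lb (t : List Char) : ∀ (i run x : Int), x ∈ pvCutsB i run t → i ≤ x := by
  induction t with
  | nil => intro i run x hx; simp [pvCutsB] at hx
  | cons c rest ih =>
    intro i run x hx
    simp only [pvCutsB] at hx
    split at hx
    · rcases List.mem_cons.mp hx with h | h
      · omega
      · have := ih (i + 1) _ x h; omega
    · have := ih (i + 1) _ x hx; omega

-- B's zip-of-consecutive-bounds construction IS sliceChunks
theorem zip_bounds_eq (s : List Char) (cuts : List Int) : ∀ p : Int,
    (((p :: (cuts ++ [(s.length : Int)])).zip ((cuts ++ [(s.length : Int)]))).map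
      (fun ab => PySem.Chars.slice s (some (ab.1 + 1)) (some ab.2)))
      = sliceChunks s p cuts := by
  induction cuts with
  | nil => intro p; simp [sliceChunks]
  | cons c cs ih =>
    intro p
    simp only [List.cons_append, List.zip_cons_cons, List.map_cons, sliceChunks]
    rw [← ih c]

-- key slice step: the chunk starting at index pre.length of pre ++ c :: rest begins with c
theorem slice_step (pre : List Char) (c : Char) (rest : List Char) (b : Int)
    (hb : (pre.length : Int) < b) :
    PySem.Chars.slice (pre ++ c :: rest) (some (pre.length : Int)) (some b)
      = c :: PySem.Chars.slice (pre ++ c :: rest) (some ((pre.length : Int) + 1)) (some b) := by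
  have h0 : (0:Int) ≤ (pre.length : Int) := Int.natCast_nonneg _
  rw [PySem.Chars.slice_eq_listSlice, PySem.Chars.slice_eq_listSlice,
      PySem.List.slice_toNat _ h0 (by omega), PySem.List.slice_toNat _ (by omega) (by omega)]
  rw [show ((pre.length : Int)).toNat = pre.length by omega,
      show ((pre.length : Int) + 1).toNat = pre.length + 1 by omega]
  rw [List.drop_left]
  have h3 : (pre ++ c :: rest).drop (pre.length + 1) = rest := by
    rw [show pre.length + 1 = (pre ++ [c]).length by simp,
        show pre ++ c :: rest = (pre ++ [c]) ++ rest by simp,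
        List.drop_left]
  rw [h3, show b.toNat - pre.length = (b.toNat - (pre.length + 1)) + 1 by omega,
      List.take_succ_cons]

-- empty chunk at a cut position
theorem slice_empty (s : List Char) (i : Int) (h0 : 0 ≤ i) :
    PySem.Chars.slice s (some i) (some i) = [] := by
  rw [PySem.Chars.slice_eq_listSlice, PySem.List.slice_toNat _ h0 h0]
  simp

-- MAIN: B's chunks at the parity-computed cuts equal the parity split of the suffix.
theorem chunks_eq_splitPar (t : List Char) : ∀ (pre : List Char) (run : Int), 0 ≤ run →
    sliceChunks (pre ++ t) ((pre.length : Int) - 1) (pvCutsB (pre.length : Int) run t)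
      = splitPar (PySem.Int.mod run 2 == 1) t := by
  induction t with
  | nil =>
    intro pre run _
    simp only [pvCutsB, sliceChunks, List.append_nil, splitPar]
    rw [show ((pre.length : Int) - 1 + 1) = (pre.length : Int) by ring,
        slice_empty _ _ (Int.natCast_nonneg _)]
  | cons c rest ih =>
    intro pre run hrun
    simp only [pvCutsB]
    have e1 : PySem.Int.mod run 2 = run % 2 := PySem.Int.mod_eq_emod_of_pos (by norm_num)
    by_cases hcut : c = ',' ∧ PySem.Int.mod run 2 = 0
    · rw [if_pos hcut]
      obtain ⟨hc, hm0⟩ := hcut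
      subst hc
      rw [if_neg (by decide : ¬ (',' = '\\'))]
      have hpar : ((PySem.Int.mod run 2 == 1) : Bool) = false := by rw [hm0]; decide
      rw [hpar, splitPar_comma]
      simp only [sliceChunks]
      rw [show ((pre.length : Int) - 1 + 1) = (pre.length : Int) by ring,
          slice_empty _ _ (Int.natCast_nonneg _)]
      have ihh := ih (pre ++ [',']) 0 le_rfl
      have hlen : (pre ++ [',']).length = pre.length + 1 := by simp
      rw [hlen, Nat.cast_add, Nat.cast_one, List.append_assoc, List.singleton_append,
          show ((pre.length : Int) + 1 - 1) = (pre.length : Int) by ring,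
          show ((PySem.Int.mod 0 2 == 1) : Bool) = false from by decide] at ihh
      rw [ihh]
    · rw [if_neg hcut]
      have hrun'0 : (0:Int) ≤ (if c = '\\' then run + 1 else 0) := by split <;> omega
      have ihh := ih (pre ++ [c]) _ hrun'0
      have hlen : (pre ++ [c]).length = pre.length + 1 := by simp
      rw [hlen, Nat.cast_add, Nat.cast_one, List.append_assoc, List.singleton_append,
          show ((pre.length : Int) + 1 - 1) = (pre.length : Int) by ring] at ihh
      have e2 : PySem.Int.mod (run + 1) 2 = (run + 1) % 2 := PySem.Int.mod_eq_emod_of_pos (by norm_num)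
      have hpar : ((PySem.Int.mod (if c = '\\' then run + 1 else 0) 2 == 1) : Bool)
          = (if c = '\\' then !((PySem.Int.mod run 2 == 1) : Bool) else false) := by
        by_cases hb : c = '\\'
        · rw [if_pos hb, if_pos hb, e1, e2]
          rcases (by omega : run % 2 = 0 ∨ run % 2 = 1) with h | h
          · rw [h, show ((run + 1) % 2 : Int) = 1 by omega]; decide
          · rw [h, show ((run + 1) % 2 : Int) = 0 by omega]; decide
        · rw [if_neg hb, if_neg hb]; decide
      have hcond : ¬ (c = ',' ∧ ((PySem.Int.mod run 2 == 1) : Bool) = false) := by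
        rintro ⟨h1', h2'⟩
        apply hcut
        refine ⟨h1', ?_⟩
        simp only [beq_eq_false_iff_ne, ne_eq, e1] at h2'
        rw [e1]
        omega
      rw [splitPar_cons_other _ _ _ hcond, ← hpar, ← ihh]
      cases hcc : pvCutsB ((pre.length : Int) + 1) (if c = '\\' then run + 1 else 0) rest with
      | nil =>
        simp only [sliceChunks, List.modifyHead]
        rw [show ((pre.length : Int) - 1 + 1) = (pre.length : Int) by ring,
            slice_step pre c rest _ (by simp only [List.length_append, List.length_cons]; push_cast; omega)]
      | cons c1 cs =>
        have hc1 : (pre.length : Int) + 1 ≤ c1 :=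
          pvCutsB_lb rest ((pre.length : Int) + 1) _ c1 (by rw [hcc]; simp)
        simp only [sliceChunks, List.modifyHead]
        rw [show ((pre.length : Int) - 1 + 1) = (pre.length : Int) by ring,
            slice_step pre c rest _ (by omega)]

-- the two programs agree on the already-stripped character list
theorem core (t : List Char) :
    (if (if t = [] then ([] : List (List Char × List Char × List Char))
         else pvParseLoop ((pvSplitDn t).length : Int) (PySem.List.enumerate (pvSplitDn t))) = []
     then ""
     else String.ofList (PySem.Chars.join [','] ((if t = [] then []
         else pvParseLoop ((pvSplitDn t).length : Int) (PySem.List.enumerate (pvSplitDn t))).map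
           (fun x => PySem.Chars.lower x.1 ++ ['='] ++ PySem.Chars.lower x.2.1))))
    = String.ofList (PySem.Chars.join [','] ((((-1 : Int) :: (pvCutsB 0 0 t ++ [(t.length : Int)])).zip
        (((-1 : Int) :: (pvCutsB 0 0 t ++ [(t.length : Int)])).tail)).filterMap
        (fun ab => pvNormComp (PySem.Chars.slice t (some (ab.1 + 1)) (some ab.2))))) := by
  rw [List.tail_cons]
  have h1 := zip_bounds_eq t (pvCutsB 0 0 t) (-1)
  have h2 := chunks_eq_splitPar t [] 0 le_rfl
  simp only [List.nil_append, List.length_nil, Nat.cast_zero, zero_sub] at h2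
  rw [show ((PySem.Int.mod 0 2 == 1) : Bool) = false from by decide] at h2
  have hB : ((((-1 : Int) :: (pvCutsB 0 0 t ++ [(t.length : Int)])).zip
        ((pvCutsB 0 0 t ++ [(t.length : Int)]))).filterMap
        (fun ab => pvNormComp (PySem.Chars.slice t (some (ab.1 + 1)) (some ab.2))))
      = (splitPar false t).filterMap pvNormComp := by
    calc ((((-1 : Int) :: (pvCutsB 0 0 t ++ [(t.length : Int)])).zip
            ((pvCutsB 0 0 t ++ [(t.length : Int)]))).filterMap
            (fun ab => pvNormComp (PySem.Chars.slice t (some (ab.1 + 1)) (some ab.2))))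
        = ((((-1 : Int) :: (pvCutsB 0 0 t ++ [(t.length : Int)])).zip
            ((pvCutsB 0 0 t ++ [(t.length : Int)]))).map
            (fun ab => PySem.Chars.slice t (some (ab.1 + 1)) (some ab.2))).filterMap pvNormComp := by
          rw [List.filterMap_map]; rfl
      _ = (sliceChunks t (-1) (pvCutsB 0 0 t)).filterMap pvNormComp := by rw [h1]
      _ = (splitPar false t).filterMap pvNormComp := by rw [h2]
  by_cases ht : t = []
  · subst ht; decide
  · simp only [if_neg ht]
    have key : (pvParseLoop ((pvSplitDn t).length : Int)
          (PySem.List.enumerate (pvSplitDn t))).map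
            (fun x => PySem.Chars.lower x.1 ++ ['='] ++ PySem.Chars.lower x.2.1)
        = (splitPar false t).filterMap pvNormComp := by
      rw [pvParseLoop_map, PySem.List.map_snd_enumerate]
      show (pvSplitGo [] t).filterMap pvNormComp = _
      rw [pvSplitGo_eq, filterMap_dropTrailNil]
      cases hsp : splitPar false t with
      | nil => exact absurd hsp (splitPar_ne_nil _ _)
      | cons y l => simp [List.modifyHead]
    by_cases hp : pvParseLoop ((pvSplitDn t).length : Int) (PySem.List.enumerate (pvSplitDn t)) = []
    · rw [if_pos hp, hB]
      rw [hp, List.map_nil] at key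
      rw [← key, PySem.Chars.join_nil]
    · rw [if_neg hp, key, hB]

-- ===== VERDICT (by name: the statement is the Claim_ definition above) =====
theorem normalize_dn_spec : Claim_equal_normalize_dn := by
  intro s _
  show normalize_dn s = normalize_dn_alt s
  unfold normalize_dn normalize_dn_alt pvParseDn
  exact core (PySem.Chars.strip s.toList)
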